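-- pv_equiv track=rewrite | github.com/Andrea4-sr/prosody_stimuli | create_initial_stimuli_dataframe.py | limited_by_four
-- ===== SOURCE A (Python) =====
-- def limited_by_four(sec_pros_break):  # extract groups of rows such that the group has a Prosodic Break of level '4' as the first and last element
--     new_group = []
--     groups = []
--     for tupl in sec_pros_break:
--         if tupl[1] == 4:
--             new_group.append(tupl)
--             new_group = [tupl]
--             groups.append(new_group)
--         else:
--             new_group.append(tupl)
--
--     return groups  # returns list of lists, each nested list is a stimuli group limited by Prosodic Breaks of level '4'
-- ===== SOURCE B (Python) =====
-- def limited_by_four(sec_pros_break):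
--     # Two staged passes: collect the positions of the level-4 breaks, then cut
--     # each group out of the list as an inclusive slice from one break to the next
--     # (the last group runs to the end of the list).
--     p = [i for i, t in enumerate(sec_pros_break) if t[1] == 4]
--     groups = []
--     for k in range(len(p)):
--         end = p[k + 1] if k + 1 < len(p) else len(sec_pros_break) - 1
--         groups.append(sec_pros_break[p[k]:end + 1])
--     return groups
-- ===== Notes on version B (the rewrite author's own statement) =====
-- stated objective: alternative
-- what changed: Replaces A's single forward loop with a mutable group aliased as the last element of the output by two staged passes: first collect the indices of the level-4 breaks via enumerate, then cut each group out as an inclusive slice from one break index to the next (last group runs to the end of the list).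
import Mathlib
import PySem

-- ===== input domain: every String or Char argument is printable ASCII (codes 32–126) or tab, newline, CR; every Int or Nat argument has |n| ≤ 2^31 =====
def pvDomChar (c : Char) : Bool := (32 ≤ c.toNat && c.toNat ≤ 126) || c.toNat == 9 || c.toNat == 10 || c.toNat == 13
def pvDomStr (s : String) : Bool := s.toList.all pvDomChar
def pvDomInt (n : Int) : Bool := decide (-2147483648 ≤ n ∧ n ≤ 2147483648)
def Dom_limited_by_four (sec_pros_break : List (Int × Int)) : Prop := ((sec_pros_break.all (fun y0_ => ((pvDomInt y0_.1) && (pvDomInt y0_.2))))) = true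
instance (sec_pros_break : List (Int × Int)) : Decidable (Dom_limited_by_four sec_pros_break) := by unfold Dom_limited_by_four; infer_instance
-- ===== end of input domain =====

-- B replaces A's aliased-mutation forward loop by two staged passes (collect level-4 indices, then inclusive slices); same O(n) cost, alternative decomposition.

-- ===== PORT A =====
-- A's `new_group` may be the (aliased) last element of `groups`; `new_group.append(tupl)`
-- then mutates that last group in place.  Modelled purely: state = (closed groups, current
-- open group, started), where `started` records that the open group is the last of `groups`.
-- (The append to the initial, never-published buffer before the first level-4 row is
-- unobservable in the return value and is dropped accordingly.)
def pvStepA (st : List (List (Int × Int)) × List (Int × Int) × Bool) (tupl : Int × Int) :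
    List (List (Int × Int)) × List (Int × Int) × Bool :=
  if tupl.2 = 4 then
    (if st.2.2 then st.1 ++ [st.2.1 ++ [tupl]] else st.1, [tupl], true)
  else
    (st.1, st.2.1 ++ [tupl], st.2.2)

def limited_by_four (sec_pros_break : List (Int × Int)) : List (List (Int × Int)) :=
  let st := sec_pros_break.foldl pvStepA ([], [], false)
  if st.2.2 then st.1 ++ [st.2.1] else st.1

-- ===== PORT B =====
-- the loop `for k in range(len(p))` of Source B, as structural recursion over p:
-- each iteration slices from p[k] to (p[k+1] if it exists else len(xs)-1), inclusive.
def pvGroups (xs : List (Int × Int)) : List Int → List (List (Int × Int))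
  | [] => []
  | i :: rest =>
    let e : Int := match rest with | j :: _ => j | [] => (xs.length : Int) - 1
    PySem.List.slice xs (some i) (some (e + 1)) :: pvGroups xs rest

def limited_by_four_alt (sec_pros_break : List (Int × Int)) : List (List (Int × Int)) :=
  let p : List Int := (PySem.List.enumerate sec_pros_break).filterMap
      (fun it => if it.2.2 = 4 then some it.1 else none)
  pvGroups sec_pros_break p

-- ===== PRECONDITION & SPEC =====
def Spec_limited_by_four (sec_pros_break : List (Int × Int)) (out : List (List (Int × Int))) : Prop := out = limited_by_four_alt sec_pros_break
instance (sec_pros_break : List (Int × Int)) (out : List (List (Int × Int))) : Decidable (Spec_limited_by_four sec_pros_break out) := by unfold Spec_limited_by_four; infer_instance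

-- ===== CLAIM =====
def Claim_equal_limited_by_four : Prop := ∀ (sec_pros_break : List (Int × Int)), Dom_limited_by_four sec_pros_break → Spec_limited_by_four sec_pros_break (limited_by_four sec_pros_break)

-- ===== LEMMAS AND PROOFS =====

-- Common specification: the "current segment up to and including the next level-4 row"
-- and the resulting group list, as plain structural recursions.
def pvBseg : List (Int × Int) → List (Int × Int)
  | [] => []
  | t :: xs => if t.2 = 4 then [t] else t :: pvBseg xs

def pvBres : List (Int × Int) → List (List (Int × Int))
  | [] => []
  | t :: xs => if t.2 = 4 then (t :: pvBseg xs) :: pvBres xs else pvBres xs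

-- ---- A-side: A's fold from an arbitrary state, with A's final read-out applied ----
def pvRA (st : List (List (Int × Int)) × List (Int × Int) × Bool) (xs : List (Int × Int)) :
    List (List (Int × Int)) :=
  let r := xs.foldl pvStepA st
  if r.2.2 then r.1 ++ [r.2.1] else r.1

theorem pvRA_true (xs : List (Int × Int)) :
    ∀ (c : List (List (Int × Int))) (cur : List (Int × Int)),
      pvRA (c, cur, true) xs = c ++ ((cur ++ pvBseg xs) :: pvBres xs) := by
  induction xs with
  | nil => intro c cur; simp [pvRA, pvBseg, pvBres]
  | cons t xs ih =>
    intro c cur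
    by_cases h : t.2 = 4
    · have : pvRA (c, cur, true) (t :: xs)
          = pvRA (c ++ [cur ++ [t]], [t], true) xs := by
        simp [pvRA, pvStepA, h]
      rw [this, ih]
      simp [pvBseg, pvBres, h]
    · have : pvRA (c, cur, true) (t :: xs)
          = pvRA (c, cur ++ [t], true) xs := by
        simp [pvRA, pvStepA, h]
      rw [this, ih]
      simp [pvBseg, pvBres, h]

theorem pvRA_false (xs : List (Int × Int)) :
    ∀ (c : List (List (Int × Int))) (cur : List (Int × Int)),
      pvRA (c, cur, false) xs = c ++ pvBres xs := by
  induction xs with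
  | nil => intro c cur; simp [pvRA, pvBres]
  | cons t xs ih =>
    intro c cur
    by_cases h : t.2 = 4
    · have : pvRA (c, cur, false) (t :: xs)
          = pvRA (c, [t], true) xs := by
        simp [pvRA, pvStepA, h]
      rw [this, pvRA_true]
      simp [pvBres, h]
    · have : pvRA (c, cur, false) (t :: xs)
          = pvRA (c, cur ++ [t], false) xs := by
        simp [pvRA, pvStepA, h]
      rw [this, ih]
      simp [pvBres, h]

theorem pvA_eq_Bres (xs : List (Int × Int)) : limited_by_four xs = pvBres xs := by
  have := pvRA_false xs [] []
  simpa [pvRA, limited_by_four] using this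

-- ---- B-side ----
def pvNatPos : List (Int × Int) → List Nat
  | [] => []
  | t :: xs => if t.2 = 4 then 0 :: (pvNatPos xs).map (· + 1) else (pvNatPos xs).map (· + 1)

theorem pvNatPos_lt (xs : List (Int × Int)) : ∀ n ∈ pvNatPos xs, n < xs.length := by
  induction xs with
  | nil => simp [pvNatPos]
  | cons t xs ih =>
    intro n hn
    simp only [pvNatPos] at hn
    split at hn
    · rw [List.mem_cons] at hn
      rcases hn with rfl | hn
      · simp
      · obtain ⟨m, hm, rfl⟩ := List.mem_map.1 hn
        have := ih m hm
        simp only [List.length_cons]; omega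
    · obtain ⟨m, hm, rfl⟩ := List.mem_map.1 hn
      have := ih m hm
      simp only [List.length_cons]; omega

theorem pvSliceShift {α : Type} (t : α) (xs : List α) (a b : Nat) :
    PySem.List.slice (t :: xs) (some ((a + 1 : Nat) : Int)) (some ((b + 1 : Nat) : Int))
      = PySem.List.slice xs (some ((a : Nat) : Int)) (some ((b : Nat) : Int)) := by
  rw [PySem.List.slice_natCast, PySem.List.slice_natCast]
  simp [Nat.succ_sub_succ]

theorem pvPos_eq (xs : List (Int × Int)) : ∀ (s : Int),
    (PySem.List.enumerate xs s).filterMap (fun it => if it.2.2 = 4 then some it.1 else none)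
      = (pvNatPos xs).map (fun n : Nat => s + (n : Int)) := by
  induction xs with
  | nil => intro s; simp [PySem.List.enumerate_nil, pvNatPos]
  | cons t xs ih =>
    intro s
    rw [PySem.List.enumerate_cons, List.filterMap_cons]
    by_cases h : t.2 = 4
    · simp only [h, ih (s + 1), pvNatPos, if_pos, reduceIte, List.map_cons, List.map_map]
      refine congrArg₂ List.cons (by push_cast; ring) ?_
      exact List.map_congr_left fun n _ => by simp [Function.comp]; push_cast; ring
    · simp only [h, ih (s + 1), pvNatPos, reduceIte, List.map_map,
        if_neg (show ¬ ((s, t).2.2 = 4) from h)]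
      exact List.map_congr_left fun n _ => by simp [Function.comp]; push_cast; ring

theorem pvGroups_shift (t : Int × Int) (xs : List (Int × Int)) :
    ∀ (p : List Nat), (∀ n ∈ p, n < xs.length) →
      pvGroups (t :: xs) ((p.map (fun n => n + 1)).map (fun n : Nat => (n : Int)))
        = pvGroups xs (p.map (fun n : Nat => (n : Int))) := by
  intro p
  induction p with
  | nil => intro _; simp [pvGroups]
  | cons i rest ih =>
    intro hb
    have hi : i < xs.length := hb i (by simp)
    have hrest : ∀ n ∈ rest, n < xs.length := fun n hn => hb n (by simp [hn])
    simp only [List.map_cons, pvGroups, ih hrest]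
    congr 1
    cases rest with
    | nil =>
      simp only [List.map_nil]
      have e1 : ((t :: xs).length : Int) - 1 + 1 = ((xs.length + 1 : Nat) : Int) := by
        simp only [List.length_cons]; push_cast; ring
      have e2 : ((xs.length : Nat) : Int) - 1 + 1 = ((xs.length : Nat) : Int) := by ring
      show PySem.List.slice _ (some ((i + 1 : Nat) : Int)) (some (((t :: xs).length : Int) - 1 + 1)) = PySem.List.slice _ (some ((i : Nat) : Int)) (some (((xs.length : Nat) : Int) - 1 + 1))
      rw [e1, e2]
      exact pvSliceShift t xs i xs.length
    | cons j rest' =>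
      simp only [List.map_cons]
      have e1 : (((j + 1 : Nat) : Int)) + 1 = ((j + 1 + 1 : Nat) : Int) := by push_cast; ring
      have e2 : ((j : Nat) : Int) + 1 = ((j + 1 : Nat) : Int) := by push_cast; ring
      show PySem.List.slice _ (some ((i + 1 : Nat) : Int)) (some (((j + 1 : Nat) : Int) + 1)) = PySem.List.slice _ (some ((i : Nat) : Int)) (some (((j : Nat) : Int) + 1))
      rw [e1, e2]
      exact pvSliceShift t xs i (j + 1)

theorem pvBseg_of_nil (xs : List (Int × Int)) (h : pvNatPos xs = []) : pvBseg xs = xs := by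
  induction xs with
  | nil => rfl
  | cons t xs ih =>
    simp only [pvNatPos] at h
    split at h
    · simp at h
    · next hne =>
      simp only [List.map_eq_nil_iff] at h
      simp [pvBseg, hne, ih h]

theorem pvBseg_of_cons (xs : List (Int × Int)) :
    ∀ (q : Nat) (rest : List Nat), pvNatPos xs = q :: rest → pvBseg xs = xs.take (q + 1) := by
  induction xs with
  | nil => intro q rest h; simp [pvNatPos] at h
  | cons t xs ih =>
    intro q rest h
    simp only [pvNatPos] at h
    split at h
    · next h4 =>
      have hq : q = 0 := by simpa using (congrArg (fun l => l.headI) h).symm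
      simp [pvBseg, h4, hq]
    · next hne =>
      cases hp : pvNatPos xs with
      | nil => rw [hp] at h; simp at h
      | cons q' rest' =>
        rw [hp] at h
        simp only [List.map_cons, List.cons.injEq] at h
        obtain ⟨hq, -⟩ := h
        have := ih q' rest' hp
        simp [pvBseg, hne, this, ← hq, List.take_succ_cons]

theorem pvAlt_eq_Bres (xs : List (Int × Int)) : limited_by_four_alt xs = pvBres xs := by
  have key : ∀ ys : List (Int × Int),
      limited_by_four_alt ys = pvGroups ys ((pvNatPos ys).map (fun n : Nat => (n : Int))) := by
    intro ys
    simp only [limited_by_four_alt]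
    rw [pvPos_eq ys 0]
    congr 1
    exact List.map_congr_left fun n _ => by simp
  induction xs with
  | nil => rfl
  | cons t xs ih =>
    rw [key]
    rw [key] at ih
    by_cases h : t.2 = 4
    · simp only [pvNatPos, if_pos h, List.map_cons]
      simp only [pvGroups]
      rw [pvGroups_shift t xs (pvNatPos xs) (pvNatPos_lt xs), ih]
      simp only [pvBres, if_pos h]
      congr 1
      cases hp : pvNatPos xs with
      | nil =>
        rw [pvBseg_of_nil xs hp]
        simp only [hp, List.map_nil]
        show PySem.List.slice _ (some ((0 : Nat) : Int)) (some (((t :: xs).length : Int) - 1 + 1)) = _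
        have e1 : ((t :: xs).length : Int) - 1 + 1 = ((xs.length + 1 : Nat) : Int) := by
          simp only [List.length_cons]; push_cast; ring
        rw [e1, Nat.cast_zero, PySem.List.slice_zero_start, PySem.List.slice_to_natCast]
        simp
      | cons q rest =>
        rw [pvBseg_of_cons xs q rest hp]
        simp only [hp, List.map_cons]
        have e1 : (((q + 1 : Nat)) : Int) + 1 = ((q + 2 : Nat) : Int) := by push_cast; ring
        rw [e1, Nat.cast_zero, PySem.List.slice_zero_start, PySem.List.slice_to_natCast]
        simp [List.take_succ_cons]
    · simp only [pvNatPos, if_neg h]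
      rw [pvGroups_shift t xs (pvNatPos xs) (pvNatPos_lt xs), ih]
      simp [pvBres, h]

-- ===== VERDICT =====
theorem limited_by_four_spec : Claim_equal_limited_by_four := by
  intro xs _
  show limited_by_four xs = limited_by_four_alt xs
  rw [pvA_eq_Bres, pvAlt_eq_Bres]
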